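-- pv_equiv track=rewrite | github.com/AlexAgo83/day-captain | src/day_captain/services.py | _clean_preview
-- ===== SOURCE A (Python) =====
-- TRIVIAL_PREVIEW_LINES = (
--     "sent from outlook for mac",
--     "sent from outlook for ios",
--     "envoye a partir de outlook pour ios",
--     "envoye a partir de outlook pour mac",
--     "envoyé à partir de outlook pour ios",
--     "envoyé à partir de outlook pour mac",
-- )
--
-- QUOTE_BOUNDARY_PREFIXES = (
--     "from:",
--     "de :",
--     "de:",
--     "date:",
--     "to:",
--     "a :",
--     "a:",
--     "à :",
--     "à:",
--     "subject:",
--     "objet :",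
--     "objet:",
-- )
--
-- def _clean_preview(preview: str) -> str:
--     if not preview:
--         return ""
--     normalized = preview.replace("\r\n", "\n").replace("\r", "\n").strip()
--     if not normalized:
--         return ""
--
--     selected_lines = []
--     for raw_line in normalized.split("\n"):
--         line = raw_line.strip()
--         if not line:
--             continue
--
--         lowered = line.lower()
--         if lowered in TRIVIAL_PREVIEW_LINES:
--             if selected_lines:
--                 break
--             continue
--         if lowered.startswith("________________________________") or lowered.startswith("-----original message-----"):
--             break
--         if lowered.startswith(QUOTE_BOUNDARY_PREFIXES):
--             if selected_lines:
--                 break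
--             continue
--
--         selected_lines.append(line)
--         if len(selected_lines) >= 3:
--             break
--
--     cleaned = " ".join(selected_lines).strip()
--     return cleaned[:280]
-- ===== SOURCE B (Python) =====
-- TRIVIAL_PREVIEW_LINES = (
--     "sent from outlook for mac",
--     "sent from outlook for ios",
--     "envoye a partir de outlook pour ios",
--     "envoye a partir de outlook pour mac",
--     "envoyé à partir de outlook pour ios",
--     "envoyé à partir de outlook pour mac",
-- )
--
-- QUOTE_BOUNDARY_PREFIXES = (
--     "from:",
--     "de :",
--     "de:",
--     "date:",
--     "to:",
--     "a :",
--     "a:",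
--     "à :",
--     "à:",
--     "subject:",
--     "objet :",
--     "objet:",
-- )
--
--
-- def _is_separator(lowered):
--     return lowered.startswith("________________________________") or lowered.startswith("-----original message-----")
--
--
-- def _clean_preview(preview: str) -> str:
--     if not preview:
--         return ""
--     normalized = preview.replace("\r\n", "\n").replace("\r", "\n").strip()
--     if not normalized:
--         return ""
--
--     lines = [ln.strip() for ln in normalized.split("\n")]
--
--     # Phase 1: skip leading empty/trivial/quote-header lines; a separator
--     # before any content means there is no preview at all.
--     i = 0
--     n = len(lines)
--     while i < n:
--         line = lines[i]
--         lowered = line.lower()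
--         if not line or lowered in TRIVIAL_PREVIEW_LINES:
--             i += 1
--             continue
--         if _is_separator(lowered):
--             return ""
--         if lowered.startswith(QUOTE_BOUNDARY_PREFIXES):
--             i += 1
--             continue
--         break
--     if i == n:
--         return ""
--
--     # Phase 2: collect up to 3 meaningful lines, skipping empties, stopping
--     # at any boundary line.
--     kept = []
--     while i < n and len(kept) < 3:
--         line = lines[i]
--         i += 1
--         if not line:
--             continue
--         lowered = line.lower()
--         if lowered in TRIVIAL_PREVIEW_LINES or _is_separator(lowered) or lowered.startswith(QUOTE_BOUNDARY_PREFIXES):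
--             break
--         kept.append(line)
--
--     return " ".join(kept).strip()[:280]
-- ===== Notes on version B (the rewrite author's own statement) =====
-- stated objective: alternative
-- what changed: A's single for-loop carrying selected_lines with mid-loop breaks is replaced by a two-phase scan over the pre-stripped line list: phase 1 skips leading empty/trivial/quote-header lines (returning '' if a separator is hit first), phase 2 collects up to 3 meaningful lines until a boundary.
import Mathlib
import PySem

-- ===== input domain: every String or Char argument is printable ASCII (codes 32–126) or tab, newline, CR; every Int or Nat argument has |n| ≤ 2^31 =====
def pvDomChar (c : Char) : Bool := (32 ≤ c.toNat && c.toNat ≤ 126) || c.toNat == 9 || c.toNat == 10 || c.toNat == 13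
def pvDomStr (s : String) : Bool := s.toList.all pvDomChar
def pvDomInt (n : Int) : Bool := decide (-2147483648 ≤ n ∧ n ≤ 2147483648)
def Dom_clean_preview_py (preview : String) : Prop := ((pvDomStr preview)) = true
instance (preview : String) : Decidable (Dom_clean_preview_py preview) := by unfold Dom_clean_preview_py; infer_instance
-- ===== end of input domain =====

-- B replaces A's single break-laden accumulator loop by two phases over the stripped
-- line list (skip leading boundary lines, then collect up to 3 lines); objective: alternative.

-- shared module constants (the Python tuples), as lists of char lists
def pvTrivial : List (List Char) :=
  ["sent from outlook for mac".toList,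
   "sent from outlook for ios".toList,
   "envoye a partir de outlook pour ios".toList,
   "envoye a partir de outlook pour mac".toList,
   "envoyé à partir de outlook pour ios".toList,
   "envoyé à partir de outlook pour mac".toList]

def pvQuote : List (List Char) :=
  ["from:".toList, "de :".toList, "de:".toList, "date:".toList, "to:".toList,
   "a :".toList, "a:".toList, "à :".toList, "à:".toList,
   "subject:".toList, "objet :".toList, "objet:".toList]

-- ===== PORT A =====
-- A's single for-loop over raw lines, carrying selected_lines; `break`/final fall out as returning sel
def pvALoop : List (List Char) → List (List Char) → List (List Char)
  | [], sel => sel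
  | raw :: rest, sel =>
    let line := PySem.Chars.strip raw
    if line = [] then pvALoop rest sel
    else
      let lowered := PySem.Chars.lower line
      if lowered ∈ pvTrivial then
        if sel ≠ [] then sel else pvALoop rest sel
      else if PySem.Chars.startswith lowered "________________________________".toList ||
              PySem.Chars.startswith lowered "-----original message-----".toList then sel
      else if pvQuote.any (fun p => PySem.Chars.startswith lowered p) then
        if sel ≠ [] then sel else pvALoop rest sel
      else
        let sel' := sel ++ [line]
        if 3 ≤ sel'.length then sel' else pvALoop rest sel'

def clean_preview_py (preview : String) : String :=
  let cs := preview.toList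
  if cs = [] then ""
  else
    let normalized := PySem.Chars.strip
      (PySem.Chars.replace (PySem.Chars.replace cs ['\r', '\n'] ['\n']) ['\r'] ['\n'])
    if normalized = [] then ""
    else
      let selected := pvALoop (PySem.Chars.splitOn normalized ['\n']) []
      let cleaned := PySem.Chars.strip (PySem.Chars.join [' '] selected)
      String.ofList (PySem.List.slice cleaned none (some 280))

-- ===== PORT B =====
def pvIsSep (lowered : List Char) : Bool :=
  PySem.Chars.startswith lowered "________________________________".toList ||
  PySem.Chars.startswith lowered "-----original message-----".toList

-- phase 1: skip leading empty/trivial/quote lines; none = a separator hit first (return "")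
def pvPhase1 : List (List Char) → Option (List (List Char))
  | [] => none
  | line :: rest =>
    let lowered := PySem.Chars.lower line
    if line = [] ∨ lowered ∈ pvTrivial then pvPhase1 rest
    else if pvIsSep lowered then none
    else if pvQuote.any (fun p => PySem.Chars.startswith lowered p) then pvPhase1 rest
    else some (line :: rest)

-- phase 2: collect up to 3 meaningful lines, skipping empties, stopping at any boundary
def pvPhase2 : List (List Char) → List (List Char) → List (List Char)
  | [], kept => kept
  | line :: rest, kept =>
    if 3 ≤ kept.length then kept
    else if line = [] then pvPhase2 rest kept
    else
      let lowered := PySem.Chars.lower line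
      if lowered ∈ pvTrivial ∨ pvIsSep lowered = true ∨
         pvQuote.any (fun p => PySem.Chars.startswith lowered p) = true then kept
      else pvPhase2 rest (kept ++ [line])

def clean_preview_py_alt (preview : String) : String :=
  let cs := preview.toList
  if cs = [] then ""
  else
    let normalized := PySem.Chars.strip
      (PySem.Chars.replace (PySem.Chars.replace cs ['\r', '\n'] ['\n']) ['\r'] ['\n'])
    if normalized = [] then ""
    else
      let lines := (PySem.Chars.splitOn normalized ['\n']).map PySem.Chars.strip
      match pvPhase1 lines with
      | none => ""
      | some tail =>
        String.ofList (PySem.List.slice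
          (PySem.Chars.strip (PySem.Chars.join [' '] (pvPhase2 tail []))) none (some 280))

-- ===== PRECONDITION & SPEC =====
def Spec_clean_preview_py (preview : String) (out : String) : Prop := out = clean_preview_py_alt preview
instance (preview : String) (out : String) : Decidable (Spec_clean_preview_py preview out) := by unfold Spec_clean_preview_py; infer_instance

-- ===== CLAIM (what is proved, stated in full; the proofs are below) =====
def Claim_equal_clean_preview_py : Prop := ∀ (preview : String), Dom_clean_preview_py preview → Spec_clean_preview_py preview (clean_preview_py preview)

-- ===== LEMMAS AND PROOFS =====

theorem pvPhase2_full (ls kept : List (List Char)) (h : 3 ≤ kept.length) : pvPhase2 ls kept = kept := by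
  cases ls with
  | nil => rfl
  | cons l rest => simp [pvPhase2, h]

theorem pvPhase2_eq (ls : List (List Char)) (sel : List (List Char))
    (hne : sel ≠ []) (hlt : sel.length < 3) :
    pvALoop ls sel = pvPhase2 (ls.map PySem.Chars.strip) sel := by
  induction ls generalizing sel with
  | nil => rfl
  | cons raw rest ih =>
    simp only [pvALoop, pvPhase2, List.map, pvIsSep]
    generalize PySem.Chars.strip raw = l
    generalize PySem.Chars.lower l = w
    split_ifs <;>
      first
        | rfl
        | omega
        | tauto
        | (exact ih _ hne hlt)
        | (exact (pvPhase2_full _ _ (by assumption)).symm)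
        | (exact ih _ (by simp) (by omega))

theorem pvPhase1_eq (ls : List (List Char)) :
    pvALoop ls [] = (pvPhase1 (ls.map PySem.Chars.strip)).elim [] (fun t => pvPhase2 t []) := by
  induction ls with
  | nil => rfl
  | cons raw rest ih =>
    simp only [pvALoop, pvPhase1, List.map, pvIsSep]
    generalize PySem.Chars.strip raw = l
    generalize hw : PySem.Chars.lower l = w
    split_ifs <;>
      first
        | rfl
        | tauto
        | (simpa using ih)
        | (simp only [Option.elim, pvPhase2, pvIsSep, hw]
           split_ifs <;>
             first
               | rfl
               | tauto
               | (exact pvPhase2_eq rest [l] (by simp) (by simp)))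

-- ===== VERDICT (by name: the statement is the Claim_ definition above) =====
theorem clean_preview_py_spec : Claim_equal_clean_preview_py := by
  intro preview _
  unfold Spec_clean_preview_py clean_preview_py clean_preview_py_alt
  by_cases hc : preview.toList = []
  · simp [hc]
  · simp only [if_neg hc]
    by_cases hn : PySem.Chars.strip
        (PySem.Chars.replace (PySem.Chars.replace preview.toList ['\r', '\n'] ['\n']) ['\r'] ['\n']) = []
    · simp [hn]
    · simp only [if_neg hn]
      rw [pvPhase1_eq]
      cases hp : pvPhase1 ((PySem.Chars.splitOn _ ['\n']).map PySem.Chars.strip) with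
      | none => simp [PySem.Chars.join, PySem.Chars.strip, PySem.List.slice]; rfl
      | some t => simp
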